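-- pv_equiv track=rewrite | github.com/aselker/laptop_input_tracker | scripts/mouse_usage_timeseries.py | fudge_nonzero
-- ===== SOURCE A (Python) =====
-- def fudge_nonzero(yss, fudge_value=1):
--     yss_fudged = yss.copy()
--
--     for i, ys in enumerate(zip(*yss_fudged)):
--         if any(ys):
--             for j, y in enumerate(ys):
--                 if not y:
--                     yss_fudged[j][i] = fudge_value
--
--     return yss_fudged
-- ===== SOURCE B (Python) =====
-- def fudge_nonzero(yss, fudge_value=1):
--     # Pure rebuild by double transpose: materialize the columns (up to the shortest
--     # row), fix each column wholesale, then transpose back and reattach each row's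
--     # untouched suffix.  Unlike A it does not mutate the inner lists in place.
--     m = min(map(len, yss), default=0)
--     cols = [[row[i] for row in yss] for i in range(m)]
--     fixed = [[y if y else fudge_value for y in c] if any(c) else c for c in cols]
--     return [[fixed[i][j] for i in range(m)] + yss[j][m:] for j in range(len(yss))]
-- ===== Notes on version B (the rewrite author's own statement) =====
-- stated objective: alternative
-- what changed: A shallow-copies the outer list and patches zeros in place while scanning zip(*yss) column-major; B is a pure pipeline that transposes the rows into columns, fixes each active column wholesale, transposes back and reattaches each row's suffix beyond the shortest row, rebuilding the result instead of mutating it.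
import Mathlib
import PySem

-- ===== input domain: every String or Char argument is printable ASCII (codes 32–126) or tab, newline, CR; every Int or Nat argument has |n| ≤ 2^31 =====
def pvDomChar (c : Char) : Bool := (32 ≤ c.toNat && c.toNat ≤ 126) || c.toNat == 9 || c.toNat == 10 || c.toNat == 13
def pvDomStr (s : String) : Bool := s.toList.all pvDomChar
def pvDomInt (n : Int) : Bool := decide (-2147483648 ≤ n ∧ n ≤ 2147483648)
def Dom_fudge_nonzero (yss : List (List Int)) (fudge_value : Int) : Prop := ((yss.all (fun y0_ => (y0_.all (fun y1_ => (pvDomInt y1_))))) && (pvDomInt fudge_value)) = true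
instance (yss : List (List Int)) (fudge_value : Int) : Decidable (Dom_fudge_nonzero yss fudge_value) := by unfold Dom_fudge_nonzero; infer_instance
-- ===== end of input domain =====

-- B rebuilds the result as a pure pipeline (transpose, fix each active column, transpose back,
-- reattach each row's suffix) instead of A's in-place column-major patching of a shallow copy;
-- A mutates the shared inner lists, so the equivalence proved here is about the RETURN value.

-- ===== PORT A =====
-- exact value of list(zip(*rows)): the columns of `rows`, truncated to the shortest row
-- (zip is a builtin; ported as this closed description of its value)
def pvCols (rows : List (List Int)) : List (List Int) :=
  (List.range (((rows.map List.length).min?).getD 0)).map (fun i => rows.map (fun r => r.getD i 0))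

def fudge_nonzero (yss : List (List Int)) (fudge_value : Int) : List (List Int) :=
  (PySem.List.enumerate (pvCols yss)).foldl (fun s p =>
    if p.2.any (fun y => y != 0) then
      (PySem.List.enumerate p.2).foldl (fun s q =>
        if q.2 == 0 then
          PySem.List.pySetD s q.1 (PySem.List.pySetD (PySem.List.pyGetD s q.1 []) p.1 fudge_value)
        else s) s
    else s) yss

-- ===== PORT B =====
-- min(map(len, yss), default=0); row[i] is always in range (i < m ≤ len(row)), so List.getD is
-- exact; yss[j][m:] with m ≥ 0 is exactly List.drop m
def fudge_nonzero_alt (yss : List (List Int)) (fudge_value : Int) : List (List Int) :=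
  let m := ((yss.map List.length).min?).getD 0
  let cols := (List.range m).map (fun i => yss.map (fun row => row.getD i 0))
  let fixed := cols.map (fun c =>
    if c.any (fun y => y != 0) then c.map (fun y => if y == 0 then fudge_value else y) else c)
  (List.range yss.length).map (fun j =>
    (List.range m).map (fun i => (fixed.getD i []).getD j 0) ++ (yss.getD j []).drop m)

-- ===== PRECONDITION & SPEC =====
def Spec_fudge_nonzero (yss : List (List Int)) (fudge_value : Int) (out : List (List Int)) : Prop := out = fudge_nonzero_alt yss fudge_value
instance (yss : List (List Int)) (fudge_value : Int) (out : List (List Int)) : Decidable (Spec_fudge_nonzero yss fudge_value out) := by unfold Spec_fudge_nonzero; infer_instance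

-- ===== CLAIM (what is proved, stated in full; the proofs are below) =====
def Claim_equal_fudge_nonzero : Prop := ∀ (yss : List (List Int)) (fudge_value : Int), Dom_fudge_nonzero yss fudge_value → Spec_fudge_nonzero yss fudge_value (fudge_nonzero yss fudge_value)

-- ===== LEMMAS AND PROOFS =====

-- the minimum row length, the i-th column, and the per-column activity predicate
def pvM (yss : List (List Int)) : Nat := ((yss.map List.length).min?).getD 0

def pvColF (yss : List (List Int)) (i : Nat) : List Int := yss.map (fun r => r.getD i 0)

def pvAct (yss : List (List Int)) (i : Nat) : Bool := yss.any (fun row => row.getD i 0 != 0)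

-- per-row fill reading the ORIGINAL row (what A effectively does to each row)
def pvFoldA (g : Nat → Bool) (v : Int) (m : Nat) (row : List Int) : List Int :=
  (List.range m).foldl (fun r i => if g i && (row.getD i 0 == 0) then r.set i v else r) row

-- per-row fill reading the CURRENT row (an intermediate form used by the proofs)
def pvFoldB (g : Nat → Bool) (v : Int) (m : Nat) (row : List Int) : List Int :=
  (List.range m).foldl (fun r i => if g i && (r.getD i 0 == 0) then r.set i v else r) row

-- A's inner loop over one column (the state update for column index i)
def pvInner (v i : Int) (ys : List Int) (j0 : Int) (s : List (List Int)) : List (List Int) :=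
  (PySem.List.enumerate ys j0).foldl (fun s q =>
    if q.2 == 0 then
      PySem.List.pySetD s q.1 (PySem.List.pySetD (PySem.List.pyGetD s q.1 []) i v)
    else s) s

theorem pvGetD_set {α : Type} (l : List α) (n k : Nat) (v d : α) (hn : n < l.length) :
    (l.set n v).getD k d = if k = n then v else l.getD k d := by
  simp only [List.getD_eq_getElem?_getD, List.getElem?_set]
  by_cases h : n = k
  · subst h; simp [hn]
  · rw [if_neg h, if_neg (fun hk => h hk.symm)]

theorem pvGetD_oob {α : Type} (l : List α) (n : Nat) (d : α) (h : l.length ≤ n) :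
    l.getD n d = d := by
  simp [List.getD_eq_getElem?_getD, List.getElem?_eq_none h]

theorem pvFoldB_length (g : Nat → Bool) (v : Int) (m : Nat) (row : List Int) :
    (pvFoldB g v m row).length = row.length := by
  induction m with
  | zero => simp [pvFoldB]
  | succ n ih =>
    have hstep : pvFoldB g v (n+1) row =
        if g n && ((pvFoldB g v n row).getD n 0 == 0) then (pvFoldB g v n row).set n v
        else pvFoldB g v n row := by
      simp only [pvFoldB, List.range_succ, List.foldl_append, List.foldl_cons, List.foldl_nil]
    rw [hstep]
    split
    · rw [List.length_set]; exact ih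
    · exact ih

theorem pvFoldB_getD (g : Nat → Bool) (v : Int) :
    ∀ (m : Nat) (row : List Int), m ≤ row.length → ∀ (k : Nat),
    (pvFoldB g v m row).getD k 0 =
      if k < m ∧ g k = true ∧ row.getD k 0 = 0 then v else row.getD k 0 := by
  intro m
  induction m with
  | zero => intro row _ k; simp [pvFoldB]
  | succ n ih =>
    intro row hm k
    have hn : n ≤ row.length := Nat.le_of_succ_le hm
    have hm' : n < row.length := hm
    have hlen := pvFoldB_length g v n row
    have hcur : (pvFoldB g v n row).getD n 0 = row.getD n 0 := by
      rw [ih row hn n]; simp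
    have hstep : pvFoldB g v (n+1) row =
        if g n && ((pvFoldB g v n row).getD n 0 == 0) then (pvFoldB g v n row).set n v
        else pvFoldB g v n row := by
      simp only [pvFoldB, List.range_succ, List.foldl_append, List.foldl_cons, List.foldl_nil]
    rw [hstep, hcur]
    by_cases hc : (g n && (row.getD n 0 == 0)) = true
    · rw [if_pos hc]
      have hc' : g n = true ∧ row.getD n 0 = 0 := by simpa using hc
      rw [pvGetD_set _ n k v 0 (by rw [hlen]; exact hm')]
      by_cases hk : k = n
      · subst hk
        rw [if_pos rfl, if_pos ⟨Nat.lt_succ_self k, hc'.1, hc'.2⟩]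
      · rw [if_neg hk, ih row hn k]
        split_ifs with h1 h2 h2
        · rfl
        · exact absurd ⟨by omega, h1.2.1, h1.2.2⟩ h2
        · exact absurd ⟨by omega, h2.2.1, h2.2.2⟩ h1
        · rfl
    · rw [if_neg hc, ih row hn k]
      have hc' : ¬(g n = true ∧ row.getD n 0 = 0) := by simpa using hc
      split_ifs with h1 h2 h2
      · rfl
      · exact absurd ⟨by omega, h1.2.1, h1.2.2⟩ h2
      · by_cases hk : k = n
        · subst hk; exact absurd ⟨h2.2.1, h2.2.2⟩ hc'
        · exact absurd ⟨by omega, h2.2.1, h2.2.2⟩ h1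
      · rfl

theorem pvFoldA_eq_pvFoldB (g : Nat → Bool) (v : Int) :
    ∀ (m : Nat) (row : List Int), m ≤ row.length → pvFoldA g v m row = pvFoldB g v m row := by
  intro m
  induction m with
  | zero => intro row _; rfl
  | succ n ih =>
    intro row hm
    have hn : n ≤ row.length := Nat.le_of_succ_le hm
    have hcur : (pvFoldB g v n row).getD n 0 = row.getD n 0 := by
      rw [pvFoldB_getD g v n row hn n]; simp
    have hA : pvFoldA g v (n+1) row =
        if g n && (row.getD n 0 == 0) then (pvFoldA g v n row).set n v else pvFoldA g v n row := by
      simp only [pvFoldA, List.range_succ, List.foldl_append, List.foldl_cons, List.foldl_nil]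
    have hB : pvFoldB g v (n+1) row =
        if g n && ((pvFoldB g v n row).getD n 0 == 0) then (pvFoldB g v n row).set n v
        else pvFoldB g v n row := by
      simp only [pvFoldB, List.range_succ, List.foldl_append, List.foldl_cons, List.foldl_nil]
    rw [hA, hB, hcur, ih row hn]

theorem pvFoldA_nil (g : Nat → Bool) (v : Int) (m : Nat) : pvFoldA g v m [] = [] := by
  induction m with
  | zero => rfl
  | succ n ih =>
    simp only [pvFoldA, List.range_succ, List.foldl_append, List.foldl_cons, List.foldl_nil]
    simp only [pvFoldA] at ih
    rw [ih]
    split <;> rfl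

-- the inner (j, y) loop of A, characterised pointwise (generalised enumerate start j0)
theorem pvInnerA (v i : Int) :
    ∀ (ys : List Int) (s : List (List Int)) (j0 : Nat), j0 + ys.length ≤ s.length →
    (pvInner v i ys (j0 : Int) s).length = s.length ∧
    ∀ (j : Nat), (pvInner v i ys (j0 : Int) s).getD j [] =
      if j0 ≤ j ∧ j < j0 + ys.length ∧ ys.getD (j - j0) 0 = 0
      then PySem.List.pySetD (s.getD j []) i v else s.getD j [] := by
  intro ys
  induction ys with
  | nil =>
    intro s j0 _
    constructor
    · simp [pvInner, PySem.List.enumerate_nil]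
    · intro j
      rw [if_neg (fun h => absurd h.2.1 (by simp only [List.length_nil]; omega))]
      simp [pvInner, PySem.List.enumerate_nil]
  | cons y t ih =>
    intro s j0 hlen
    simp only [List.length_cons] at hlen
    have hj0 : j0 < s.length := by omega
    have hcast : ((j0 : Int) + 1) = ((j0 + 1 : Nat) : Int) := by push_cast; ring
    have hcons : pvInner v i (y :: t) (j0 : Int) s =
        pvInner v i t ((j0 + 1 : Nat) : Int)
          (if y == 0 then s.set j0 (PySem.List.pySetD (s.getD j0 []) i v) else s) := by
      simp only [pvInner, PySem.List.enumerate_cons, List.foldl_cons, hcast,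
        PySem.List.pySetD_natCast, PySem.List.pyGetD_natCast]
    set s1 := if y == 0 then s.set j0 (PySem.List.pySetD (s.getD j0 []) i v) else s with hs1
    have hs1len : s1.length = s.length := by
      rw [hs1]; split <;> simp
    have hs1getD : ∀ (j : Nat), s1.getD j [] =
        if j = j0 ∧ y = 0 then PySem.List.pySetD (s.getD j0 []) i v else s.getD j [] := by
      intro j
      rw [hs1]
      by_cases hy : y = 0
      · rw [if_pos (by simpa using hy), pvGetD_set _ j0 j _ _ hj0]
        split_ifs with h1 h2 h2
        · rfl
        · exact absurd ⟨h1, hy⟩ h2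
        · exact absurd h2.1 h1
        · rfl
      · rw [if_neg (by simpa using hy), if_neg (fun h => hy h.2)]
    have hIH := ih s1 (j0 + 1) (by rw [hs1len]; omega)
    rw [hcons]
    refine ⟨by rw [hIH.1, hs1len], ?_⟩
    intro j
    rw [hIH.2 j, hs1getD j]
    simp only [List.length_cons]
    by_cases hjlt : j = j0
    · have houter : ¬(j0 + 1 ≤ j ∧ j < j0 + 1 + t.length ∧ t.getD (j - (j0 + 1)) 0 = 0) :=
        fun h => absurd h.1 (by omega)
      rw [if_neg houter]
      have h3 : (y :: t).getD (j - j0) 0 = y := by rw [hjlt]; simp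
      by_cases hy : y = 0
      · rw [if_pos ⟨hjlt, hy⟩, if_pos ⟨by omega, by omega, by rw [h3]; exact hy⟩, hjlt]
      · rw [if_neg (fun h : j = j0 ∧ y = 0 => hy h.2),
            if_neg (fun h : j0 ≤ j ∧ j < j0 + (t.length + 1) ∧ (y :: t).getD (j - j0) 0 = 0 =>
              hy (by rw [← h3]; exact h.2.2))]
    · have hinner : ¬(j = j0 ∧ y = 0) := fun h => hjlt h.1
      rw [if_neg hinner]
      by_cases hge : j0 + 1 ≤ j
      · have hd : (y :: t).getD (j - j0) 0 = t.getD (j - (j0 + 1)) 0 := by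
          have hj : j - j0 = (j - (j0 + 1)) + 1 := by omega
          rw [hj, List.getD_cons_succ]
        rw [hd]
        split_ifs with h1 h2 h2
        · rfl
        · exact absurd ⟨by omega, by omega, h1.2.2⟩ h2
        · exact absurd ⟨by omega, by omega, h2.2.2⟩ h1
        · rfl
      · rw [if_neg (fun h : j0 + 1 ≤ j ∧ j < j0 + 1 + t.length ∧ t.getD (j - (j0 + 1)) 0 = 0 =>
              absurd h.1 (by omega)),
            if_neg (fun h : j0 ≤ j ∧ j < j0 + (t.length + 1) ∧ (y :: t).getD (j - j0) 0 = 0 =>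
              absurd (Nat.lt_of_le_of_ne h.1 (fun hh => hjlt hh.symm)) (by omega))]

theorem pvEnumMapRange {α : Type} (f : Nat → α) :
    ∀ (n : Nat) (s : Nat), PySem.List.enumerate ((List.range n).map f) (s : Int) =
      (List.range n).map (fun k => (((s + k : Nat) : Int), f k)) := by
  intro n
  induction n with
  | zero => intro s; simp [PySem.List.enumerate_nil]
  | succ n ih =>
    intro s
    rw [List.range_succ, List.map_append, PySem.List.enumerate_append, ih, List.map_append]
    congr 1
    simp [PySem.List.enumerate_cons, PySem.List.enumerate_nil]

theorem pvEnumMapRange0 {α : Type} (f : Nat → α) (n : Nat) :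
    PySem.List.enumerate ((List.range n).map f) 0 =
      (List.range n).map (fun k : Nat => ((k : Int), f k)) := by
  have h := pvEnumMapRange f n 0
  simp only [Nat.zero_add, Nat.cast_zero] at h
  exact h

theorem pvA_eq_outer (yss : List (List Int)) (v : Int) :
    fudge_nonzero yss v = (List.range (pvM yss)).foldl (fun s k =>
      if (pvColF yss k).any (fun y => y != 0) then pvInner v (k : Int) (pvColF yss k) 0 s
      else s) yss := by
  unfold fudge_nonzero pvCols
  rw [pvEnumMapRange0 (fun i => yss.map (fun r => r.getD i 0)) (((yss.map List.length).min?).getD 0),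
    List.foldl_map]
  rfl

theorem pvAct_eq (yss : List (List Int)) (k : Nat) :
    pvAct yss k = (pvColF yss k).any (fun y => y != 0) := by
  simp only [pvAct, pvColF, List.any_map]
  rfl

theorem pvColF_getD (yss : List (List Int)) (k j : Nat) (hj : j < yss.length) :
    (pvColF yss k).getD j 0 = (yss.getD j []).getD k 0 := by
  rw [List.getD_eq_getElem _ _ (by simpa [pvColF] using hj), List.getD_eq_getElem _ _ hj]
  simp [pvColF]

theorem pvOuter (yss : List (List Int)) (v : Int) :
    ∀ (c : Nat),
    ((List.range c).foldl (fun s k =>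
        if (pvColF yss k).any (fun y => y != 0) then pvInner v (k : Int) (pvColF yss k) 0 s
        else s) yss).length = yss.length ∧
    ∀ (j : Nat), ((List.range c).foldl (fun s k =>
        if (pvColF yss k).any (fun y => y != 0) then pvInner v (k : Int) (pvColF yss k) 0 s
        else s) yss).getD j [] = pvFoldA (pvAct yss) v c (yss.getD j []) := by
  intro c
  induction c with
  | zero => exact ⟨rfl, fun j => by simp [pvFoldA]⟩
  | succ c ih =>
    simp only [List.range_succ, List.foldl_append, List.foldl_cons, List.foldl_nil]
    have hA1 : ∀ (row : List Int), pvFoldA (pvAct yss) v (c+1) row =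
        if pvAct yss c && (row.getD c 0 == 0) then (pvFoldA (pvAct yss) v c row).set c v
        else pvFoldA (pvAct yss) v c row := by
      intro row
      simp only [pvFoldA, List.range_succ, List.foldl_append, List.foldl_cons, List.foldl_nil]
    by_cases hact : ((pvColF yss c).any (fun y => y != 0)) = true
    · rw [if_pos hact]
      have hgc : pvAct yss c = true := by rw [pvAct_eq]; exact hact
      have hinner := pvInnerA v (c : Int) (pvColF yss c)
        ((List.range c).foldl (fun s k =>
          if (pvColF yss k).any (fun y => y != 0) then pvInner v (k : Int) (pvColF yss k) 0 s
          else s) yss) 0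
        (by simp only [Nat.zero_add, pvColF, List.length_map]; exact ih.1.ge)
      have hcl : (pvColF yss c).length = yss.length := by simp [pvColF]
      simp only [Nat.cast_zero, Nat.zero_add, Nat.sub_zero, Nat.zero_le, true_and, hcl] at hinner
      constructor
      · rw [hinner.1, ih.1]
      · intro j
        rw [hinner.2 j, hA1 (yss.getD j [])]
        by_cases hj : j < yss.length
        · have hcol : (pvColF yss c).getD j 0 = (yss.getD j []).getD c 0 := pvColF_getD yss c j hj
          by_cases hz : (yss.getD j []).getD c 0 = 0
          · rw [if_pos ⟨hj, by rw [hcol]; exact hz⟩, ih.2 j,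
              if_pos (by simp only [hgc, Bool.true_and, beq_iff_eq]; exact hz),
              PySem.List.pySetD_natCast]
          · rw [if_neg (fun h => hz (by rw [← hcol]; exact h.2)), ih.2 j,
              if_neg (by simp only [hgc, Bool.true_and, beq_iff_eq]; exact hz)]
        · have hrow : yss.getD j [] = [] := pvGetD_oob _ _ _ (by omega)
          rw [if_neg (fun h => hj h.1), ih.2 j, hrow]
          simp [pvFoldA_nil]
    · rw [if_neg hact]
      have hgc : pvAct yss c = false := by rw [pvAct_eq]; simpa using hact
      refine ⟨ih.1, fun j => ?_⟩
      rw [ih.2 j, hA1, hgc]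
      simp

theorem pvM_le (yss : List (List Int)) (row : List Int) (h : row ∈ yss) :
    pvM yss ≤ row.length := by
  have hmem : row.length ∈ yss.map List.length := List.mem_map_of_mem h
  unfold pvM
  rcases hx : (yss.map List.length).min? with _ | a
  · simp
  · rw [List.min?_eq_some_iff] at hx
    simpa using hx.2 _ hmem

-- the column fixer of B, named for the proofs
def pvFix (v : Int) (c : List Int) : List Int :=
  if c.any (fun y => y != 0) then c.map (fun y => if y == 0 then v else y) else c

theorem pvB_unfold (yss : List (List Int)) (v : Int) :
    fudge_nonzero_alt yss v = (List.range yss.length).map (fun j =>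
      (List.range (pvM yss)).map (fun i =>
        ((((List.range (pvM yss)).map (pvColF yss)).map (pvFix v)).getD i []).getD j 0)
      ++ (yss.getD j []).drop (pvM yss)) := rfl

theorem pvFixed_getD (yss : List (List Int)) (v : Int) (i : Nat) (hi : i < pvM yss) :
    (((List.range (pvM yss)).map (pvColF yss)).map (pvFix v)).getD i [] =
      pvFix v (pvColF yss i) := by
  rw [List.getD_eq_getElem _ [] (by simpa using hi)]
  simp

-- ===== VERDICT (by name: the statement is the Claim_ definition above) =====
theorem fudge_nonzero_spec : Claim_equal_fudge_nonzero := by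
  unfold Claim_equal_fudge_nonzero
  intro yss v _
  unfold Spec_fudge_nonzero
  show fudge_nonzero yss v = fudge_nonzero_alt yss v
  have hout := pvOuter yss v (pvM yss)
  rw [pvA_eq_outer, pvB_unfold]
  apply List.ext_getElem
  · rw [hout.1]; simp
  · intro j h1 h2
    have hj : j < yss.length := by rw [hout.1] at h1; exact h1
    rw [← List.getD_eq_getElem _ [] h1, hout.2 j]
    simp only [List.getElem_map, List.getElem_range]
    set row := yss.getD j [] with hrowdef
    have hrow : row ∈ yss := by
      rw [hrowdef, List.getD_eq_getElem _ [] hj]; exact List.getElem_mem hj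
    have hle : pvM yss ≤ row.length := pvM_le yss row hrow
    rw [pvFoldA_eq_pvFoldB _ _ _ _ hle]
    apply List.ext_getElem
    · rw [pvFoldB_length]
      simp only [List.length_append, List.length_map, List.length_range, List.length_drop]
      omega
    · intro k hk1 hk2
      have hk : k < row.length := by rw [pvFoldB_length] at hk1; exact hk1
      rw [← List.getD_eq_getElem _ 0 hk1, pvFoldB_getD _ _ _ _ hle k]
      by_cases hkm : k < pvM yss
      · rw [List.getElem_append_left (by simpa using hkm)]
        simp only [List.getElem_map, List.getElem_range]
        rw [pvFixed_getD yss v k hkm]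
        have hcl : (pvColF yss k).length = yss.length := by simp [pvColF]
        have hcol : (pvColF yss k).getD j 0 = row.getD k 0 := pvColF_getD yss k j hj
        unfold pvFix
        by_cases hact : ((pvColF yss k).any (fun y => y != 0)) = true
        · have hgk : pvAct yss k = true := by rw [pvAct_eq]; exact hact
          rw [if_pos hact]
          have hmap : ((pvColF yss k).map (fun y => if y == 0 then v else y)).getD j 0 =
              if row.getD k 0 == 0 then v else row.getD k 0 := by
            rw [List.getD_eq_getElem _ 0 (by rw [List.length_map, hcl]; exact hj),
              List.getElem_map, ← List.getD_eq_getElem _ 0 (by rw [hcl]; exact hj), hcol]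
          rw [hmap]
          by_cases hz : row.getD k 0 = 0
          · rw [if_pos ⟨hkm, hgk, hz⟩, if_pos (by simpa using hz)]
          · rw [if_neg (fun h => hz h.2.2), if_neg (by simpa using hz)]
        · have hgk : pvAct yss k = false := by rw [pvAct_eq]; simpa using hact
          rw [if_neg hact, hcol, if_neg (fun h => by rw [hgk] at h; exact absurd h.2.1 (by simp))]
      · have hlenmap : ((List.range (pvM yss)).map (fun i =>
            ((((List.range (pvM yss)).map (pvColF yss)).map (pvFix v)).getD i []).getD j 0)).length
            = pvM yss := by simp
        rw [List.getElem_append_right (by rw [hlenmap]; omega), List.getElem_drop,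
            if_neg (fun h => hkm h.1), List.getD_eq_getElem _ 0 hk]
        congr 1
        rw [hlenmap]
        omega
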